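-- pv_equiv track=rewrite | github.com/wildcraft958/form_agent_project | src/template_parser.py | _extract_options_for_field
-- ===== SOURCE A (Python) =====
-- def _extract_options_for_field(field_label):
--     """
--     Extract options for select fields based on common medical terminology.
--
--     Args:
--         field_label (str): Field label
--
--     Returns:
--         list: List of options
--     """
--     label_lower = field_label.lower()
--
--     # Gender options
--     if any(term in label_lower for term in ['gender', 'sex']):
--         return [
--             {"value": "male", "text": "Male"},
--             {"value": "female", "text": "Female"},
--             {"value": "other", "text": "Other"}
--         ]
--
--     # Yes/No options
--     if any(term in label_lower for term in ['present', 'absent', 'positive', 'negative']):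
--         return [
--             {"value": "yes", "text": "Yes"},
--             {"value": "no", "text": "No"}
--         ]
--
--     # Laterality options
--     if any(term in label_lower for term in ['laterality', 'side']):
--         return [
--             {"value": "right", "text": "Right"},
--             {"value": "left", "text": "Left"},
--             {"value": "bilateral", "text": "Bilateral"}
--         ]
--
--     # Default options (for testing)
--     return [
--         {"value": "option1", "text": "Option 1"},
--         {"value": "option2", "text": "Option 2"},
--         {"value": "option3", "text": "Option 3"}
--     ]
-- ===== SOURCE B (Python) =====
-- # Different approach: no grouped if-chain with early returns. A flat keyword->priority
-- # map is folded once with a running minimum priority; the final priority indexes an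
-- # options array (priority 3 = no keyword matched = default options).
--
-- _KEYWORD_PRIORITY = {
--     'gender': 0, 'sex': 0,
--     'present': 1, 'absent': 1, 'positive': 1, 'negative': 1,
--     'laterality': 2, 'side': 2,
-- }
--
-- _OPTIONS_BY_PRIORITY = [
--     [{"value": "male", "text": "Male"},
--      {"value": "female", "text": "Female"},
--      {"value": "other", "text": "Other"}],
--     [{"value": "yes", "text": "Yes"},
--      {"value": "no", "text": "No"}],
--     [{"value": "right", "text": "Right"},
--      {"value": "left", "text": "Left"},
--      {"value": "bilateral", "text": "Bilateral"}],
--     [{"value": "option1", "text": "Option 1"},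
--      {"value": "option2", "text": "Option 2"},
--      {"value": "option3", "text": "Option 3"}],
-- ]
--
-- def _extract_options_for_field(field_label):
--     label_lower = field_label.lower()
--     best = 3
--     for kw, pri in _KEYWORD_PRIORITY.items():
--         if pri < best and kw in label_lower:
--             best = pri
--     return _OPTIONS_BY_PRIORITY[best]
-- ===== Notes on version B (the rewrite author's own statement) =====
-- stated objective: alternative
-- what changed: Replaced the grouped if-chain with early returns by a single fold over a flat keyword-to-priority map that keeps the minimum matching priority, which then indexes an options array.
import Mathlib
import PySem

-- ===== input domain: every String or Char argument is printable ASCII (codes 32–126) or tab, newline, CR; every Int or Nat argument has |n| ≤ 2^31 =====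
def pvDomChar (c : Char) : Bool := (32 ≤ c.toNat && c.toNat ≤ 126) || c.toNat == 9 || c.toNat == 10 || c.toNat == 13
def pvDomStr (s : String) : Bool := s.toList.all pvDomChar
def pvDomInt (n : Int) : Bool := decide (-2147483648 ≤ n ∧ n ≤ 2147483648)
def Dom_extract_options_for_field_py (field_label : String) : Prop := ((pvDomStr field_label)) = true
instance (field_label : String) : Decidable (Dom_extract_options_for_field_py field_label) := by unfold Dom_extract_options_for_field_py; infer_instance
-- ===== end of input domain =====

-- B replaces A's grouped if-chain by a min-priority fold over a flat keyword→priority map,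
-- indexing an options array with the result (objective: alternative).


-- ===== PORT A =====
def extract_options_for_field_py (field_label : String) : List (List (String × String)) :=
  let label_lower := PySem.Str.lower field_label
  if (["gender", "sex"]).any (fun term => PySem.Str.isIn term label_lower) then
    [[("value", "male"), ("text", "Male")],
     [("value", "female"), ("text", "Female")],
     [("value", "other"), ("text", "Other")]]
  else if (["present", "absent", "positive", "negative"]).any (fun term => PySem.Str.isIn term label_lower) then
    [[("value", "yes"), ("text", "Yes")],
     [("value", "no"), ("text", "No")]]
  else if (["laterality", "side"]).any (fun term => PySem.Str.isIn term label_lower) then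
    [[("value", "right"), ("text", "Right")],
     [("value", "left"), ("text", "Left")],
     [("value", "bilateral"), ("text", "Bilateral")]]
  else
    [[("value", "option1"), ("text", "Option 1")],
     [("value", "option2"), ("text", "Option 2")],
     [("value", "option3"), ("text", "Option 3")]]

-- ===== PORT B =====
-- the flat keyword→priority map of Source B (dict in insertion order)
def pvKeywordPriority : List (String × Nat) :=
  [("gender", 0), ("sex", 0),
   ("present", 1), ("absent", 1), ("positive", 1), ("negative", 1),
   ("laterality", 2), ("side", 2)]

-- the options array of Source B, indexed by priority (3 = default)
def pvOptionsByPriority : List (List (List (String × String))) :=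
  [[[("value", "male"), ("text", "Male")],
    [("value", "female"), ("text", "Female")],
    [("value", "other"), ("text", "Other")]],
   [[("value", "yes"), ("text", "Yes")],
    [("value", "no"), ("text", "No")]],
   [[("value", "right"), ("text", "Right")],
    [("value", "left"), ("text", "Left")],
    [("value", "bilateral"), ("text", "Bilateral")]],
   [[("value", "option1"), ("text", "Option 1")],
    [("value", "option2"), ("text", "Option 2")],
    [("value", "option3"), ("text", "Option 3")]]]

def extract_options_for_field_py_alt (field_label : String) : List (List (String × String)) :=
  let label_lower := PySem.Str.lower field_label
  let best := pvKeywordPriority.foldl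
    (fun best kp => if kp.2 < best ∧ PySem.Str.isIn kp.1 label_lower then kp.2 else best) 3
  pvOptionsByPriority.getD best []   -- index is always 0..3, so in range

-- ===== PRECONDITION & SPEC =====
def Spec_extract_options_for_field_py (field_label : String) (out : List (List (String × String))) : Prop := out = extract_options_for_field_py_alt field_label
instance (field_label : String) (out : List (List (String × String))) : Decidable (Spec_extract_options_for_field_py field_label out) := by unfold Spec_extract_options_for_field_py; infer_instance

-- ===== CLAIM (what is proved, stated in full; the proofs are below) =====
def Claim_equal_extract_options_for_field_py : Prop := ∀ (field_label : String), Dom_extract_options_for_field_py field_label → Spec_extract_options_for_field_py field_label (extract_options_for_field_py field_label)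

-- ===== LEMMAS AND PROOFS =====

-- ===== VERDICT (by name: the statement is the Claim_ definition above) =====
-- proof-only helpers: both ports as functions of the 8 substring tests
def pvAShape (b1 b2 b3 b4 b5 b6 b7 b8 : Bool) : List (List (String × String)) :=
  if (b1 || (b2 || false)) = true then
    [[("value", "male"), ("text", "Male")],
     [("value", "female"), ("text", "Female")],
     [("value", "other"), ("text", "Other")]]
  else if (b3 || (b4 || (b5 || (b6 || false)))) = true then
    [[("value", "yes"), ("text", "Yes")],
     [("value", "no"), ("text", "No")]]
  else if (b7 || (b8 || false)) = true then
    [[("value", "right"), ("text", "Right")],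
     [("value", "left"), ("text", "Left")],
     [("value", "bilateral"), ("text", "Bilateral")]]
  else
    [[("value", "option1"), ("text", "Option 1")],
     [("value", "option2"), ("text", "Option 2")],
     [("value", "option3"), ("text", "Option 3")]]

def pvBShape (b1 b2 b3 b4 b5 b6 b7 b8 : Bool) : List (List (String × String)) :=
  pvOptionsByPriority.getD
    (([((0 : Nat), b1), (0, b2), (1, b3), (1, b4), (1, b5), (1, b6), (2, b7), (2, b8)]).foldl
      (fun best kb => if kb.1 < best ∧ kb.2 = true then kb.1 else best) 3) []

theorem pvShape_eq : ∀ (b1 b2 b3 b4 b5 b6 b7 b8 : Bool),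
    pvAShape b1 b2 b3 b4 b5 b6 b7 b8 = pvBShape b1 b2 b3 b4 b5 b6 b7 b8 := by decide

set_option maxHeartbeats 1000000 in
theorem extract_options_for_field_py_spec : Claim_equal_extract_options_for_field_py := by
  intro s _
  unfold Spec_extract_options_for_field_py
  have hA : extract_options_for_field_py s =
      pvAShape (PySem.Str.isIn "gender" (PySem.Str.lower s)) (PySem.Str.isIn "sex" (PySem.Str.lower s))
        (PySem.Str.isIn "present" (PySem.Str.lower s)) (PySem.Str.isIn "absent" (PySem.Str.lower s))
        (PySem.Str.isIn "positive" (PySem.Str.lower s)) (PySem.Str.isIn "negative" (PySem.Str.lower s))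
        (PySem.Str.isIn "laterality" (PySem.Str.lower s)) (PySem.Str.isIn "side" (PySem.Str.lower s)) := rfl
  have hB : extract_options_for_field_py_alt s =
      pvBShape (PySem.Str.isIn "gender" (PySem.Str.lower s)) (PySem.Str.isIn "sex" (PySem.Str.lower s))
        (PySem.Str.isIn "present" (PySem.Str.lower s)) (PySem.Str.isIn "absent" (PySem.Str.lower s))
        (PySem.Str.isIn "positive" (PySem.Str.lower s)) (PySem.Str.isIn "negative" (PySem.Str.lower s))
        (PySem.Str.isIn "laterality" (PySem.Str.lower s)) (PySem.Str.isIn "side" (PySem.Str.lower s)) := rfl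
  rw [hA, hB, pvShape_eq]
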